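-- pv_equiv track=rewrite | github.com/gil9red/SimplePyScripts | separate_conjoint_words.py | separate_conjoint_words
-- ===== SOURCE A (Python) =====
-- def separate_conjoint_words(text):
--     """Функция разделяет слитные слова, на пересечении разных регистров или при встрече с цифрой и оформляет строку
--     в виде предложения: первый символ заглавный, остальные строчные.
--     Пример: CardsPickedSinceCleaningCard -> Cards picked since cleaning card
--             TotalPickedInputHopper6      -> Total picked input hopper 6
--     """
--     if not text:
--         return text
--
--     res = ""
--     for c in text:
--         res += " " + c if c.isupper() or c.isdigit() else c
--
--     # Удаление пробелов с краев
--     res = res.strip()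
--
--     # Первый символ в верхний регистр, остальные в нижний
--     return res.capitalize()
-- ===== SOURCE B (Python) =====
-- def separate_conjoint_words(text):
--     if not text:
--         return text
--     # Stage 1: find the absolute indices where a new word starts.
--     breaks = [i for i, c in enumerate(text) if c.isupper() or c.isdigit()]
--     # Stage 2: slice the text between consecutive boundaries and join.
--     bounds = [0] + breaks + [len(text)]
--     parts = [text[a:b] for a, b in zip(bounds, bounds[1:])]
--     return " ".join(parts).strip().capitalize()
-- ===== Notes on version B (the rewrite author's own statement) =====
-- stated objective: alternative
-- what changed: B first computes the list of absolute boundary indices (enumerate + comprehension), then slices the text between consecutive bounds via zip and joins the slices with spaces, instead of A's single character-by-character pass that grows one flat string with a space glued before each uppercase/digit character.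
import Mathlib
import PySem

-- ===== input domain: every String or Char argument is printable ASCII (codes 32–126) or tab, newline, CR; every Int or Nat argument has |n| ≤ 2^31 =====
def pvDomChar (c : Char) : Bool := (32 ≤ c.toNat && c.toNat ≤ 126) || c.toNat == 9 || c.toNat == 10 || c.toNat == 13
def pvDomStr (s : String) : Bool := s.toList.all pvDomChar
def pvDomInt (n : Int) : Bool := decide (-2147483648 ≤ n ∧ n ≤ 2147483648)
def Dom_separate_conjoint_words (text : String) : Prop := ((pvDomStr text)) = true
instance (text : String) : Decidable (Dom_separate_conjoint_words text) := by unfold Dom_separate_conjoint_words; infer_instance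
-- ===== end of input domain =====

-- B re-implements A in stages: it first computes the list of absolute boundary indices, then
-- slices the text between consecutive bounds and joins the slices with spaces, instead of A's
-- single character pass growing one flat accumulator string; objective: alternative decomposition.

-- str.capitalize() : first char to upper, rest to lower (exact on ASCII; ported by hand, PySem has no capitalize)
def pyCapitalize (cs : List Char) : List Char :=
  match cs with
  | [] => []
  | c :: rest => PySem.Chars.upperChar c :: PySem.Chars.lower rest

-- ===== PORT A =====
def separate_conjoint_words (text : String) : String :=
  if text = "" then text
  else
    let res := text.toList.foldl
      (fun res c =>
        res ++ (if PySem.Chars.isupper c || PySem.Chars.isdigit c then [' ', c] else [c])) []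
    String.ofList (pyCapitalize (PySem.Chars.strip res))

-- ===== PORT B =====
def separate_conjoint_words_alt (text : String) : String :=
  if text = "" then text
  else
    let cs := text.toList
    -- breaks = [i for i, c in enumerate(text) if c.isupper() or c.isdigit()]
    let breaks := (PySem.List.enumerate cs).filterMap
      (fun ic => if PySem.Chars.isupper ic.2 || PySem.Chars.isdigit ic.2 then some ic.1 else none)
    -- bounds = [0] + breaks + [len(text)]
    let bounds := [(0 : Int)] ++ breaks ++ [(cs.length : Int)]
    -- parts = [text[a:b] for a, b in zip(bounds, bounds[1:])]
    let parts := (bounds.zip (PySem.List.slice bounds (some 1) none)).map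
      (fun ab => PySem.List.slice cs (some ab.1) (some ab.2))
    -- " ".join(parts).strip().capitalize()
    String.ofList (pyCapitalize (PySem.Chars.strip (PySem.Chars.join [' '] parts)))

-- ===== PRECONDITION & SPEC =====
def Spec_separate_conjoint_words (text : String) (out : String) : Prop := out = separate_conjoint_words_alt text
instance (text : String) (out : String) : Decidable (Spec_separate_conjoint_words text out) := by unfold Spec_separate_conjoint_words; infer_instance

-- ===== CLAIM (what is proved, stated in full; the proofs are below) =====
def Claim_equal_separate_conjoint_words : Prop := ∀ (text : String), Dom_separate_conjoint_words text → Spec_separate_conjoint_words text (separate_conjoint_words text)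

-- ===== LEMMAS AND PROOFS =====

-- the word-boundary predicate both programs test
def pvP (c : Char) : Bool := PySem.Chars.isupper c || PySem.Chars.isdigit c

-- the chunk A appends for one character
def pvChunk (c : Char) : List Char := if pvP c then [' ', c] else [c]

-- the boundary positions of a list starting at absolute position s (Nat mirror of B's `breaks`)
def pvBrk : List Char → Nat → List Nat
  | [], _ => []
  | c :: l, s => (if pvP c then [s] else []) ++ pvBrk l (s + 1)

-- cast a list of Nat positions to the Int indices B's port carries
def pvCast : List Nat → List Int
  | [] => []
  | n :: t => (n : Int) :: pvCast t

theorem pvCast_append (xs ys : List Nat) : pvCast (xs ++ ys) = pvCast xs ++ pvCast ys := by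
  induction xs with
  | nil => rfl
  | cons a xs ih => simp [pvCast, ih]

theorem pvEnumBrk (l : List Char) : ∀ s : Nat,
    (PySem.List.enumerate l (s : Int)).filterMap
      (fun ic => if PySem.Chars.isupper ic.2 || PySem.Chars.isdigit ic.2 then some ic.1 else none)
    = pvCast (pvBrk l s) := by
  induction l with
  | nil => intro s; simp [PySem.List.enumerate_nil, pvBrk, pvCast]
  | cons c l ih =>
    intro s
    have hs1 : ((s : Int) + 1) = ((s + 1 : Nat) : Int) := by push_cast; ring
    rw [PySem.List.enumerate_cons, hs1]
    by_cases hc : (PySem.Chars.isupper c || PySem.Chars.isdigit c) = true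
    · have hb : pvBrk (c :: l) s = s :: pvBrk l (s + 1) := by simp [pvBrk, pvP, hc]
      rw [hb]
      have hcast : pvCast (s :: pvBrk l (s + 1)) = (s : Int) :: pvCast (pvBrk l (s + 1)) := rfl
      rw [hcast, List.filterMap_cons, ← ih (s + 1)]
      simp [hc]
    · have hb : pvBrk (c :: l) s = pvBrk l (s + 1) := by simp [pvBrk, pvP, hc]
      rw [hb, List.filterMap_cons, ← ih (s + 1)]
      simp [hc]

-- slicing at the cast bounds is the drop/take at the Nat bounds
theorem pvSliceCast (cs : List Char) : ∀ bs : List Nat,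
    ((pvCast bs).zip (pvCast bs).tail).map
      (fun ab => PySem.List.slice cs (some ab.1) (some ab.2))
    = (bs.zip bs.tail).map (fun ab => (cs.drop ab.1).take (ab.2 - ab.1)) := by
  intro bs
  induction bs with
  | nil => simp [pvCast]
  | cons a bs ih =>
    cases bs with
    | nil => simp [pvCast]
    | cons b t =>
      have h1 : pvCast (a :: b :: t) = (a : Int) :: (b : Int) :: pvCast t := rfl
      have h2 : pvCast (b :: t) = (b : Int) :: pvCast t := rfl
      simp only [h2, List.tail_cons] at ih
      simp only [h1, List.tail_cons, List.zip_cons_cons, List.map_cons,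
        PySem.List.slice_natCast]
      exact congrArg (List.cons _) ih

theorem pvJoinConsNe (p : List Char) (ps : List (List Char)) (h : ps ≠ []) :
    PySem.Chars.join [' '] (p :: ps) = p ++ ' ' :: PySem.Chars.join [' '] ps := by
  cases ps with
  | nil => cases h rfl
  | cons q t => rw [PySem.Chars.join_cons_cons]; simp

-- the heart: joining the slices between consecutive bounds yields A's chunk concatenation
theorem pvG (full : List Char) : ∀ (l : List Char) (s prev : Nat),
    full.drop s = l → prev ≤ s → s ≤ full.length →
    PySem.Chars.join [' ']
      (((prev :: (pvBrk l s ++ [full.length])).zip (pvBrk l s ++ [full.length])).map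
        (fun ab => (full.drop ab.1).take (ab.2 - ab.1)))
    = (full.drop prev).take (s - prev) ++ l.flatMap pvChunk := by
  intro l
  induction l with
  | nil =>
    intro s prev hdrop hps hsl
    have hs : s = full.length := by
      have := List.drop_eq_nil_iff.mp hdrop
      omega
    subst hs
    simp only [pvBrk, List.nil_append, List.zip_cons_cons, List.zip_nil_right,
      List.map_cons, List.map_nil, PySem.Chars.join_singleton, List.flatMap_nil,
      List.append_nil]
  | cons c l ih =>
    intro s prev hdrop hps hsl
    have hslt : s < full.length := by
      by_contra h
      rw [List.drop_eq_nil_iff.mpr (by omega)] at hdrop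
      exact (List.cons_ne_nil c l) hdrop.symm
    have hdrop' : full.drop (s + 1) = l := by
      have h1 : full.drop (s + 1) = (full.drop s).drop 1 := by rw [List.drop_drop]
      rw [h1, hdrop]; rfl
    have hgetc : full[s]? = some c := by
      have h0 : (full.drop s)[0]? = some c := by rw [hdrop]; rfl
      rw [List.getElem?_drop] at h0
      simpa using h0
    by_cases hc : pvP c = true
    · -- boundary: a fresh part starts at s
      have hb : pvBrk (c :: l) s = s :: pvBrk l (s + 1) := by simp [pvBrk, hc]
      rw [hb]
      have hne : (((s :: (pvBrk l (s + 1) ++ [full.length])).zip (pvBrk l (s + 1) ++ [full.length])).map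
          (fun ab => (full.drop ab.1).take (ab.2 - ab.1))) ≠ [] := by
        cases pvBrk l (s + 1) <;> simp
      rw [List.cons_append, List.zip_cons_cons, List.map_cons,
        pvJoinConsNe _ _ hne, ih (s + 1) s hdrop' (by omega) (by omega)]
      have h1 : (full.drop s).take (s + 1 - s) = [c] := by
        have h2 : s + 1 - s = 1 := by omega
        rw [h2, hdrop]; rfl
      rw [h1]
      simp [pvChunk, hc]
    · -- no boundary: the running part extends by c
      have hb : pvBrk (c :: l) s = pvBrk l (s + 1) := by simp [pvBrk, hc]
      rw [hb, ih (s + 1) prev hdrop' (by omega) (by omega)]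
      have hstep : (full.drop prev).take (s + 1 - prev)
          = (full.drop prev).take (s - prev) ++ [c] := by
        have h1 : s + 1 - prev = (s - prev) + 1 := by omega
        rw [h1, List.take_add_one]
        have h2 : (full.drop prev)[s - prev]? = some c := by
          rw [List.getElem?_drop]
          have h3 : prev + (s - prev) = s := by omega
          rw [h3]; exact hgetc
        rw [h2]; rfl
      rw [hstep]
      simp [pvChunk, hc]

-- ===== VERDICT (by name: the statement is the Claim_ definition above) =====
theorem separate_conjoint_words_spec : Claim_equal_separate_conjoint_words := by
  intro text _
  show separate_conjoint_words text = separate_conjoint_words_alt text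
  unfold separate_conjoint_words separate_conjoint_words_alt
  by_cases he : text = ""
  · simp [he]
  · simp only [if_neg he]
    set cs := text.toList with hcs
    -- A's fold is an append-only fold: rewrite it with the flatMap lemma
    have hA : cs.foldl
        (fun res c =>
          res ++ (if PySem.Chars.isupper c || PySem.Chars.isdigit c then [' ', c] else [c])) []
        = cs.flatMap pvChunk := by
      have h := PySem.List.foldl_append_eq_flatMap (l := cs) (g := pvChunk) (acc := [])
      simp only [List.nil_append] at h
      rw [← h]
      simp [pvChunk, pvP]
    -- B's breaks are the Nat boundary positions, cast
    have hBrk : (PySem.List.enumerate cs).filterMap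
        (fun ic => if PySem.Chars.isupper ic.2 || PySem.Chars.isdigit ic.2 then some ic.1 else none)
        = pvCast (pvBrk cs 0) := by
      have h := pvEnumBrk cs 0
      rw [Nat.cast_zero] at h
      exact h
    -- B's bounds are the cast of the Nat bounds list
    have hBounds : [(0 : Int)] ++ pvCast (pvBrk cs 0) ++ [(cs.length : Int)]
        = pvCast (0 :: (pvBrk cs 0 ++ [cs.length])) := by
      simp [pvCast, pvCast_append]
    rw [hA, hBrk, hBounds, PySem.List.slice_from_one, pvSliceCast]
    have hG := pvG cs cs 0 0 (by simp) (by omega) (by omega)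
    simp only [List.tail_cons]
    rw [hG]
    simp
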